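-- pv_equiv track=rewrite | github.com/Aleksei222/calculator | pyton/correct.py | ex
-- ===== SOURCE A (Python) =====
-- def ex(str):
--     alg = "+/-*"
--     num = '1234567890'
--     alg_met = 0
--     num_met = 0
--     for lit in str:
--         if lit in alg:
--             alg_met+=1
--         if lit in num:
--             num_met+=1
--     if alg_met==0 or num_met==0:
--         return True
--     return False
-- ===== SOURCE B (Python) =====
-- def ex(str):
--     # Invert the traversal: loop over the fixed alphabets, not over the input.
--     has_op = any(op in str for op in "+/-*")
--     has_digit = any(d in str for d in "1234567890")
--     return not (has_op and has_digit)
-- ===== Notes on version B (the rewrite author's own statement) =====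
-- stated objective: alternative
-- what changed: Inverts the traversal: instead of A's single scan over the input with two occurrence counters, B loops over the two fixed alphabets ('+/-*' and the ten digits) and probes each symbol's presence in the string with a short-circuiting any, returning not (has_op and has_digit).
import Mathlib
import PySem

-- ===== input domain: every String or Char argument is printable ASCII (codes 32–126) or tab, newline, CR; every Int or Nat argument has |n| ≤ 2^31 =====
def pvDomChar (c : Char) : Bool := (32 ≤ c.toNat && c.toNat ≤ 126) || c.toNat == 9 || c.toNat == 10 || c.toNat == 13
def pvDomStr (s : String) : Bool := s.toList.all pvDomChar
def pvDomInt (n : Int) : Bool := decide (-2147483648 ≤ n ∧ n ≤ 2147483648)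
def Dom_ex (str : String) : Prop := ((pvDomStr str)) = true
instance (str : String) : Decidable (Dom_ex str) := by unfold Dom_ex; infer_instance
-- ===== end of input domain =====

-- B inverts the traversal: it loops over the two fixed alphabets and probes each symbol's
-- membership in the string, instead of A's scan of the input with two counters (objective: alternative).

-- ===== PORT A =====
def ex (str : String) : Bool :=
  let alg := "+/-*"
  let num := "1234567890"
  let st : Int × Int := str.toList.foldl
    (fun (p : Int × Int) lit =>
      let p1 := if lit ∈ alg.toList then (p.1 + 1, p.2) else p
      if lit ∈ num.toList then (p1.1, p1.2 + 1) else p1)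
    (0, 0)
  if st.1 == 0 || st.2 == 0 then true else false

-- ===== PORT B =====
-- 'op in str' for a single-character op is exactly character membership in the string.
def ex_alt (str : String) : Bool :=
  let hasOp := "+/-*".toList.any (fun op => op ∈ str.toList)
  let hasDigit := "1234567890".toList.any (fun d => d ∈ str.toList)
  !(hasOp && hasDigit)

-- ===== PRECONDITION & SPEC =====
def Spec_ex (str : String) (out : Bool) : Prop := out = ex_alt str
instance (str : String) (out : Bool) : Decidable (Spec_ex str out) := by unfold Spec_ex; infer_instance

-- ===== CLAIM (what is proved, stated in full; the proofs are below) =====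
def Claim_equal_ex : Prop := ∀ (str : String), Dom_ex str → Spec_ex str (ex str)

-- ===== LEMMAS AND PROOFS =====

theorem ex_fold_counts (alg num : List Char) (l : List Char) (a n : Int) :
    l.foldl
      (fun (p : Int × Int) lit =>
        let p1 := if lit ∈ alg then (p.1 + 1, p.2) else p
        if lit ∈ num then (p1.1, p1.2 + 1) else p1)
      (a, n)
    = (a + (l.countP (· ∈ alg) : Int),
       n + (l.countP (· ∈ num) : Int)) := by
  induction l generalizing a n with
  | nil => simp
  | cons c l ih =>
    simp only [List.foldl_cons, List.countP_cons]
    by_cases h1 : c ∈ alg <;> by_cases h2 : c ∈ num <;>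
      simp only [h1, h2, if_true, if_false, ih, decide_true, decide_false] <;>
      push_cast <;> ring_nf

theorem any_mem_iff_count_ne_zero (t l : List Char) :
    (t.any (fun c => c ∈ l)) = true ↔ l.countP (· ∈ t) ≠ 0 := by
  rw [List.any_eq_true, Ne, List.countP_eq_zero]
  push Not
  constructor
  · rintro ⟨c, hc, hl⟩; exact ⟨c, by simpa using hl, by simpa using hc⟩
  · rintro ⟨c, hl, hc⟩; exact ⟨c, by simpa using hc, by simpa using hl⟩

-- ===== VERDICT (by name: the statement is the Claim_ definition above) =====
theorem ex_spec : Claim_equal_ex := by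
  intro str _
  unfold Spec_ex ex ex_alt
  simp only []
  rw [ex_fold_counts]
  have c1 := any_mem_iff_count_ne_zero "+/-*".toList str.toList
  have c2 := any_mem_iff_count_ne_zero "1234567890".toList str.toList
  generalize hA : ("+/-*".toList.any (fun op => op ∈ str.toList)) = a at c1 ⊢
  generalize hB : ("1234567890".toList.any (fun d => d ∈ str.toList)) = b at c2 ⊢
  generalize hm : str.toList.countP (· ∈ "+/-*".toList) = m at c1 ⊢
  generalize hn : str.toList.countP (· ∈ "1234567890".toList) = n at c2 ⊢
  cases a with
  | false =>
    have hm0 : m = 0 := by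
      by_contra h; exact absurd (c1.mpr h) (by simp)
    cases b <;> simp [hm0]
  | true =>
    have hm1 : m ≠ 0 := c1.mp rfl
    cases b with
    | false =>
      have hn0 : n = 0 := by
        by_contra h; exact absurd (c2.mpr h) (by simp)
      simp [hn0]
    | true =>
      have hn1 : n ≠ 0 := c2.mp rfl
      simp [hm1, hn1]
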